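-- pv_equiv track=rewrite | github.com/adriendubois10/tetris_couleur | tetriscouleur_xens2019.py | detectalignement
-- ===== SOURCE A (Python) =====
-- VIDE = []
--
-- def detectalignement(rangee):
--
--     changement, n, m = [], len(rangee), 1
--     for i in range(n):
--         if i==(n-1) or rangee[i]!=rangee[i+1]:
--         #si i=n-1, la condtion est fausee et le 'ou' non exclusif permet de ne pas calculer rangee[n] qui n'existe pas
--             changement.append((rangee[i],m,i-(m-1)))
--             m = 1
--         else:
--             m += 1
--
--     score, marking = 0, [False]*n
--     for k in changement:
--         elem, m, i0 = k
--         if elem != VIDE and m>=3: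
--             score += m-2
--             marking[i0:i0+m] = [True]*m
--     return (marking, score)
-- ===== SOURCE B (Python) =====
-- VIDE = []
--
-- def detectalignement(rangee):
--     # Single pass over runs: find each maximal run directly and emit its
--     # marking block and score contribution, with no intermediate run list.
--     marking, score, i, n = [], 0, 0, len(rangee)
--     while i < n:
--         j = i + 1
--         while j < n and rangee[j] == rangee[i]:
--             j += 1
--         m = j - i
--         if rangee[i] != VIDE and m >= 3:
--             score += m - 2
--             marking += [True] * m
--         else:
--             marking += [False] * m
--         i = j
--     return (marking, score)
-- ===== Notes on version B (the rewrite author's own statement) =====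
-- stated objective: simpler
-- what changed: B fuses A's two passes into one run-at-a-time loop that finds each maximal run directly and emits its marking block and score inline, dropping A's intermediate (color,length,start) triple list and the slice assignment into a preallocated False array.
import Mathlib
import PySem

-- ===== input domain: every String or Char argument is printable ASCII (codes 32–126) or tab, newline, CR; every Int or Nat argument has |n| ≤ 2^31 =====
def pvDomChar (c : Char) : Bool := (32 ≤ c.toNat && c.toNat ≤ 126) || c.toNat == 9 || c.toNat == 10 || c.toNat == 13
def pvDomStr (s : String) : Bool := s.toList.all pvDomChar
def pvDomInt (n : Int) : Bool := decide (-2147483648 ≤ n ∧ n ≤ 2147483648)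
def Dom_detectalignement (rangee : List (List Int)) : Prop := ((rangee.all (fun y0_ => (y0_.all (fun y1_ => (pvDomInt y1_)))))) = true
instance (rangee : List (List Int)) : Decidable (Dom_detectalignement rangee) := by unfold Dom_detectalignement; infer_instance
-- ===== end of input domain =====

-- B fuses A's two passes into one run-at-a-time loop (no intermediate run-triple list); objective: simpler.

-- ===== PORT A =====
-- marking[i0:i0+m] = [True]*m ; exact for the calls A makes (0 ≤ i0, 0 ≤ m, i0+m ≤ len l)
def pySliceAssignTrue (l : List Bool) (i0 m : Int) : List Bool :=
  l.take i0.toNat ++ List.replicate m.toNat true ++ l.drop (i0.toNat + m.toNat)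

-- body of A's first loop; rangee[i] via pyGetD (all reads in range; the read at i+1 is
-- short-circuited by the `i == n-1` disjunct exactly when it would be out of range)
def loop1Step (rangee : List (List Int)) (st : List ((List Int) × Int × Int) × Int) (i : Int) :
    List ((List Int) × Int × Int) × Int :=
  if i == (rangee.length : Int) - 1
      || PySem.List.pyGetD rangee i [] != PySem.List.pyGetD rangee (i+1) [] then
    (st.1 ++ [(PySem.List.pyGetD rangee i [], st.2, i - (st.2 - 1))], 1)
  else (st.1, st.2 + 1)

-- body of A's second loop (VIDE = [])
def loop2Step (st : List Bool × Int) (k : (List Int) × Int × Int) : List Bool × Int :=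
  if k.1 ≠ [] ∧ 3 ≤ k.2.1 then
    (pySliceAssignTrue st.1 k.2.2 k.2.1, st.2 + (k.2.1 - 2))
  else st

def detectalignement (rangee : List (List Int)) : List Bool × Int :=
  let changement :=
    ((PySem.List.pyRange 0 (rangee.length : Int) 1).foldl (loop1Step rangee) ([], 1)).1
  changement.foldl loop2Step (List.replicate rangee.length false, 0)

-- ===== PORT B =====
-- B's inner while: length of the leading run equal to `h` in the rest, and what follows it
def runSplit (h : List Int) : List (List Int) → Nat × List (List Int)
  | [] => (0, [])
  | x :: t => if x == h then ((runSplit h t).1 + 1, (runSplit h t).2) else (0, x :: t)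

theorem runSplit_snd_length_le (h : List Int) :
    ∀ t : List (List Int), (runSplit h t).2.length ≤ t.length
  | [] => le_refl _
  | x :: t => by
    by_cases hx : x == h <;> simp [runSplit, hx]
    exact le_trans (runSplit_snd_length_le h t) (Nat.le_succ _)

-- B's outer while, as structural recursion on the remaining suffix
def altGo : List (List Int) → List Bool → Int → List Bool × Int
  | [], mk, sc => (mk, sc)
  | h :: t, mk, sc =>
    if h ≠ [] ∧ 3 ≤ (runSplit h t).1 + 1 then
      altGo (runSplit h t).2 (mk ++ List.replicate ((runSplit h t).1 + 1) true)
        (sc + ((((runSplit h t).1 : Int) + 1) - 2))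
    else
      altGo (runSplit h t).2 (mk ++ List.replicate ((runSplit h t).1 + 1) false) sc
  termination_by l _ _ => l.length
  decreasing_by all_goals exact Nat.lt_succ_of_le (runSplit_snd_length_le h t)

def detectalignement_alt (rangee : List (List Int)) : List Bool × Int := altGo rangee [] 0

-- ===== PRECONDITION & SPEC =====
def Spec_detectalignement (rangee : List (List Int)) (out : List Bool × Int) : Prop := out = detectalignement_alt rangee
instance (rangee : List (List Int)) (out : List Bool × Int) : Decidable (Spec_detectalignement rangee out) := by unfold Spec_detectalignement; infer_instance

-- ===== CLAIM (what is proved, stated in full; the proofs are below) =====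
def Claim_equal_detectalignement : Prop := ∀ (rangee : List (List Int)), Dom_detectalignement rangee → Spec_detectalignement rangee (detectalignement rangee)

-- ===== LEMMAS AND PROOFS =====

theorem runSplit_decomp (h : List Int) :
    ∀ t : List (List Int), t = List.replicate (runSplit h t).1 h ++ (runSplit h t).2 := by
  intro t
  induction t with
  | nil => simp [runSplit]
  | cons x t ih =>
    by_cases hx : x == h
    · simp [runSplit, hx, List.replicate_succ]
      constructor
      · exact (eq_of_beq hx)
      · exact ih
    · simp [runSplit, hx]

theorem runSplit_not_head (h : List Int) :
    ∀ t x t', (runSplit h t).2 = x :: t' → x ≠ h := by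
  intro t
  induction t with
  | nil => intro x t' hx; simp [runSplit] at hx
  | cons y t ih =>
    intro x t' hx
    by_cases hy : y == h
    · simp [runSplit, hy] at hx; exact ih x t' hx
    · simp [runSplit, hy] at hx
      intro hc; apply hy; rw [hx.1, hc]; exact BEq.rfl

-- the run-triple list A's first loop produces, described run by run
def triples : Nat → List (List Int) → List ((List Int) × Int × Int)
  | _, [] => []
  | p, h :: t =>
    (h, ((runSplit h t).1 : Int) + 1, (p : Int)) ::
      triples (p + (runSplit h t).1 + 1) (runSplit h t).2
  termination_by _ l => l.length
  decreasing_by exact Nat.lt_succ_of_le (runSplit_snd_length_le h t)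

theorem L1run (rangee : List (List Int)) (h : List Int) :
    ∀ (k : Nat) (p : Nat) (c : Int) (ch : List ((List Int) × Int × Int)) (rest : List (List Int)),
      rangee.drop p = List.replicate (k+1) h ++ rest →
      (rest = [] ∨ ∀ x t', rest = x :: t' → x ≠ h) →
      (PySem.List.pyRange (p : Int) (rangee.length : Int) 1).foldl (loop1Step rangee) (ch, c)
        = (PySem.List.pyRange ((p : Int) + (k : Int) + 1) (rangee.length : Int) 1).foldl
            (loop1Step rangee) (ch ++ [(h, c + (k : Int), (p : Int) - (c - 1))], 1) := by
  intro k
  induction k with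
  | zero =>
    intro p c ch rest hdrop hrest
    have hlen := congrArg List.length hdrop
    simp at hlen
    have hp : p < rangee.length := by omega
    have hget : rangee[p]? = some h := by
      have h0 : (rangee.drop p)[0]? = some h := by rw [hdrop]; simp
      rw [List.getElem?_drop] at h0; simpa using h0
    rw [PySem.List.pyRange_one_cons (by exact_mod_cast hp), List.foldl_cons]
    have hstep : loop1Step rangee (ch, c) (p : Int)
        = (ch ++ [(h, c, (p : Int) - (c - 1))], 1) := by
      have hgd : PySem.List.pyGetD rangee (p : Int) [] = h := by
        simp [PySem.List.pyGetD_natCast, List.getD_eq_getElem?_getD, hget]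
      have hlast : rest = [] → loop1Step rangee (ch, c) (p : Int) = (ch ++ [(h, c, (p : Int) - (c - 1))], 1) := by
        intro hnil
        subst hnil
        have hn : ((p : Int) == (rangee.length : Int) - 1) = true := by
          simp at hlen ⊢; omega
        simp [loop1Step, hn, hgd]
      rcases hrest with hnil | hne
      · exact hlast hnil
      · rcases rest with _ | ⟨x, t'⟩
        · exact hlast rfl
        · have hx : x ≠ h := hne x t' rfl
          have hget1 : rangee[p+1]? = some x := by
            have h1 : (rangee.drop p)[1]? = some x := by rw [hdrop]; simp
            rw [List.getElem?_drop] at h1; simpa using h1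
          have hgd1 : PySem.List.pyGetD rangee ((p : Int) + 1) [] = x := by
            rw [show ((p : Int) + 1) = ((p + 1 : Nat) : Int) from by push_cast; ring,
              PySem.List.pyGetD_natCast, List.getD_eq_getElem?_getD, hget1]
            rfl
          simp [loop1Step, hgd, hgd1]
          intro _
          exact fun hc => hx hc.symm
    rw [hstep]
    norm_num
  | succ k ih =>
    intro p c ch rest hdrop hrest
    have hlen := congrArg List.length hdrop
    simp at hlen
    have hp : p < rangee.length := by omega
    have hget : rangee[p]? = some h := by
      have h0 : (rangee.drop p)[0]? = some h := by
        rw [hdrop]; simp [List.replicate_succ]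
      rw [List.getElem?_drop] at h0; simpa using h0
    have hget1 : rangee[p+1]? = some h := by
      have h1 : (rangee.drop p)[1]? = some h := by
        rw [hdrop]
        rw [List.replicate_succ, List.replicate_succ]
        simp
      rw [List.getElem?_drop] at h1; simpa using h1
    have hgd : PySem.List.pyGetD rangee (p : Int) [] = h := by
      simp [PySem.List.pyGetD_natCast, List.getD_eq_getElem?_getD, hget]
    have hgd1 : PySem.List.pyGetD rangee ((p : Int) + 1) [] = h := by
      rw [show ((p : Int) + 1) = ((p + 1 : Nat) : Int) from by push_cast; ring,
        PySem.List.pyGetD_natCast, List.getD_eq_getElem?_getD, hget1]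
      rfl
    have hstep : loop1Step rangee (ch, c) (p : Int) = (ch, c + 1) := by
      have hne : ((p : Int) == (rangee.length : Int) - 1) = false := by
        simp; omega
      simp [loop1Step, hne, hgd, hgd1]
    rw [PySem.List.pyRange_one_cons (by exact_mod_cast hp), List.foldl_cons, hstep]
    have hdrop' : rangee.drop (p+1) = List.replicate (k+1) h ++ rest := by
      have : rangee.drop (p+1) = (rangee.drop p).drop 1 := by
        rw [List.drop_drop]
      rw [this, hdrop, List.replicate_succ]
      simp
    have := ih (p+1) (c+1) ch rest hdrop' hrest
    push_cast at this ⊢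
    rw [this]
    have e1 : (p : Int) + 1 + (k : Int) + 1 = (p : Int) + ((k : Int) + 1) + 1 := by ring
    have e2 : c + 1 + (k : Int) = c + ((k : Int) + 1) := by ring
    have e3 : (p : Int) + 1 - (c + 1 - 1) = (p : Int) - (c - 1) := by ring
    rw [e1, e2, e3]

theorem L1 (rangee : List (List Int)) :
    ∀ (suffix : List (List Int)) (p : Nat) (ch : List ((List Int) × Int × Int)),
      rangee.drop p = suffix →
      (PySem.List.pyRange (p : Int) (rangee.length : Int) 1).foldl (loop1Step rangee) (ch, 1)
        = (ch ++ triples p suffix, 1)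
  | [], p, ch => by
    intro hd
    have hlen := congrArg List.length hd
    simp at hlen
    have hle : rangee.length ≤ p := by omega
    rw [PySem.List.pyRange_one_eq_nil (by exact_mod_cast hle)]
    simp [triples]
  | h :: t, p, ch => by
    intro hd
    have hdec := runSplit_decomp h t
    have hd' : rangee.drop p
        = List.replicate ((runSplit h t).1 + 1) h ++ (runSplit h t).2 := by
      rw [hd, List.replicate_succ]
      simp
      exact hdec
    have hrest : (runSplit h t).2 = []
        ∨ ∀ x t', (runSplit h t).2 = x :: t' → x ≠ h := by
      rcases hr : (runSplit h t).2 with _ | ⟨x, t'⟩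
      · exact Or.inl rfl
      · exact Or.inr (fun y s hy => by
          apply runSplit_not_head h t y s
          rw [hr, hy])
    rw [L1run rangee h (runSplit h t).1 p 1 ch (runSplit h t).2 hd' hrest]
    have hd2 : rangee.drop (p + (runSplit h t).1 + 1) = (runSplit h t).2 := by
      have h1 : rangee.drop (p + ((runSplit h t).1 + 1))
          = (rangee.drop p).drop ((runSplit h t).1 + 1) := by
        rw [List.drop_drop]
      have h2 : p + (runSplit h t).1 + 1 = p + ((runSplit h t).1 + 1) := by omega
      rw [h2, h1, hd']
      rw [List.drop_left' (by simp)]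
    have := L1 rangee (runSplit h t).2 (p + (runSplit h t).1 + 1)
      (ch ++ [(h, 1 + ((runSplit h t).1 : Int), (p : Int) - (1 - 1))]) hd2
    push_cast at this ⊢
    rw [this]
    simp [triples, List.append_assoc]
    omega
  termination_by suffix => suffix.length
  decreasing_by exact Nat.lt_succ_of_le (runSplit_snd_length_le h t)

theorem L2 :
    ∀ (suffix : List (List Int)) (p : Nat) (mk : List Bool) (sc : Int),
      mk.length = p →
      (triples p suffix).foldl loop2Step (mk ++ List.replicate suffix.length false, sc)
        = altGo suffix mk sc
  | [], p, mk, sc => by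
    intro _
    simp [triples, altGo]
  | h :: t, p, mk, sc => by
    intro hlen
    have hdec := runSplit_decomp h t
    have hlensuf : (h :: t).length = ((runSplit h t).1 + 1) + (runSplit h t).2.length := by
      conv_lhs => rw [show h :: t = List.replicate ((runSplit h t).1 + 1) h ++ (runSplit h t).2
        from by rw [List.replicate_succ]; simp; exact hdec]
      simp
    have hrep : List.replicate (h :: t).length false
        = List.replicate ((runSplit h t).1 + 1) false ++ List.replicate (runSplit h t).2.length false := by
      rw [hlensuf, List.replicate_add]
    have hc_iff : (3 ≤ ((runSplit h t).1 : Int) + 1) ↔ (3 ≤ (runSplit h t).1 + 1) := by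
      omega
    by_cases hc : h ≠ [] ∧ 3 ≤ (runSplit h t).1 + 1
    · have hstep : loop2Step (mk ++ List.replicate (h :: t).length false, sc)
          (h, ((runSplit h t).1 : Int) + 1, (p : Int))
          = ((mk ++ List.replicate ((runSplit h t).1 + 1) true)
              ++ List.replicate (runSplit h t).2.length false,
             sc + ((((runSplit h t).1 : Int) + 1) - 2)) := by
        rw [loop2Step, if_pos ⟨hc.1, hc_iff.mpr hc.2⟩]
        simp only [pySliceAssignTrue]
        have ht1 : ((p : Int)).toNat = p := by simp
        have ht2 : (((runSplit h t).1 : Int) + 1).toNat = (runSplit h t).1 + 1 := by omega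
        rw [hrep, ht1, ht2]
        have htake : (mk ++ (List.replicate ((runSplit h t).1 + 1) false
            ++ List.replicate (runSplit h t).2.length false)).take p = mk :=
          List.take_left' hlen
        have hdrop : (mk ++ (List.replicate ((runSplit h t).1 + 1) false
            ++ List.replicate (runSplit h t).2.length false)).drop (p + ((runSplit h t).1 + 1))
            = List.replicate (runSplit h t).2.length false := by
          rw [← List.append_assoc]
          exact List.drop_left' (by simp [hlen])
        rw [htake, hdrop]
      rw [triples, List.foldl_cons, hstep,
        L2 (runSplit h t).2 (p + (runSplit h t).1 + 1)
          (mk ++ List.replicate ((runSplit h t).1 + 1) true)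
          (sc + ((((runSplit h t).1 : Int) + 1) - 2))
          (by simp only [List.length_append, List.length_replicate, hlen]; omega)]
      rw [altGo, if_pos hc]
    · have hstep : loop2Step (mk ++ List.replicate (h :: t).length false, sc)
          (h, ((runSplit h t).1 : Int) + 1, (p : Int))
          = ((mk ++ List.replicate ((runSplit h t).1 + 1) false)
              ++ List.replicate (runSplit h t).2.length false, sc) := by
        rw [loop2Step, if_neg (by
          intro hcon
          exact hc ⟨hcon.1, hc_iff.mp hcon.2⟩)]
        rw [hrep, ← List.append_assoc]
      rw [triples, List.foldl_cons, hstep,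
        L2 (runSplit h t).2 (p + (runSplit h t).1 + 1)
          (mk ++ List.replicate ((runSplit h t).1 + 1) false) sc
          (by simp only [List.length_append, List.length_replicate, hlen]; omega)]
      rw [altGo, if_neg hc]
  termination_by suffix => suffix.length
  decreasing_by all_goals exact Nat.lt_succ_of_le (runSplit_snd_length_le h t)

-- ===== VERDICT (by name: the statement is the Claim_ definition above) =====
theorem detectalignement_spec : Claim_equal_detectalignement := by
  intro rangee _
  unfold Spec_detectalignement detectalignement detectalignement_alt
  have h1 := L1 rangee rangee 0 [] (by simp)
  simp only [Nat.cast_zero] at h1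
  rw [h1]
  simpa using L2 rangee 0 [] 0 rfl
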